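-- pv_equiv track=rewrite | github.com/ducnguyen1014/DM-A | multi-objective_vehicle_routing_problem/generate_splits.py | generate_splits
-- ===== SOURCE A (Python) =====
-- from itertools import combinations
--
-- def generate_splits(customers, max_trucks):
--     """
--     Generate all possible splits of customers into 1 to max_trucks groups.
--     Returns a list of lists, where each sublist is a grouping of customers.
--     """
--     all_splits = []
--
--     for num_trucks in range(1, max_trucks + 1):
--         # Generate all combinations of splits for the current number of trucks
--         # We create indices for splitting
--         indices = range(1, len(customers))  # Indices to split on
--
--         # Find all combinations of splitting indices
--         for comb in combinations(
--             indices, num_trucks - 1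
--         ):  # num_trucks - 1 splits create num_trucks groups
--             # Create split points based on the current combination of indices
--             split_points = (0,) + comb + (len(customers),)
--             split = [
--                 customers[split_points[i] : split_points[i + 1]]
--                 for i in range(num_trucks)
--             ]
--             all_splits.append(split)
--
--     return all_splits
-- ===== SOURCE B (Python) =====
-- def partition(lst, k):
--     """All splits of lst into exactly k contiguous groups, first group shortest first."""
--     if k == 1:
--         return [[lst]]
--     result = []
--     for p in range(1, len(lst) - k + 2):
--         head = lst[:p]
--         for rest in partition(lst[p:], k - 1):
--             result.append([head] + rest)
--     return result
--
-- def generate_splits(customers, max_trucks):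
--     all_splits = []
--     for num_trucks in range(1, max_trucks + 1):
--         all_splits.extend(partition(customers, num_trucks))
--     return all_splits
-- ===== Notes on version B (the rewrite author's own statement) =====
-- stated objective: alternative
-- what changed: Replaced A's enumeration of (num_trucks-1)-combinations of split indices (via itertools.combinations plus slicing between consecutive split points) by a structural recursion that peels off every possible first group and recurses on the remaining suffix with one truck fewer.
import Mathlib
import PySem

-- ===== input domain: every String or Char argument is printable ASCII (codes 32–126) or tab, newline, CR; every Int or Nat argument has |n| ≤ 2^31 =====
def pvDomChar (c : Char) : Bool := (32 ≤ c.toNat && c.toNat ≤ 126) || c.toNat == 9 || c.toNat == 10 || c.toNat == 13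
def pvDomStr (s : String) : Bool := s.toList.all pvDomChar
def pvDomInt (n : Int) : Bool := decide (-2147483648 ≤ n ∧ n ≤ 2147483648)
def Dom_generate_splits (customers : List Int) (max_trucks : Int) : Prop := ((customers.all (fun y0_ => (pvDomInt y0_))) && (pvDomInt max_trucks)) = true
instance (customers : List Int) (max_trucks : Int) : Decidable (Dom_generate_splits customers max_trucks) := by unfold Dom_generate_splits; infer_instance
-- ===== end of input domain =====

-- B replaces A's enumeration of combinations of split indices by a structural recursion
-- that peels off the first group and recurses on the remainder (objective: alternative).


-- ===== PORT A =====
-- hand port of itertools.combinations(xs, r): lexicographic order, exact for r ≥ 0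
def pvCombinations : List Int → Nat → List (List Int)
  | _, 0 => [[]]
  | [], _ + 1 => []
  | x :: xs, r + 1 => (pvCombinations xs r).map (fun c => x :: c) ++ pvCombinations xs (r + 1)

def generate_splits (customers : List Int) (max_trucks : Int) : List (List (List Int)) :=
  (PySem.List.pyRange 1 (max_trucks + 1)).foldl (fun all_splits num_trucks =>
    let indices := PySem.List.pyRange 1 (customers.length : Int)
    -- num_trucks ≥ 1 on this range, so (num_trucks - 1).toNat = num_trucks - 1 exactly
    (pvCombinations indices (num_trucks - 1).toNat).foldl (fun all_splits comb =>
      let split_points : List Int := 0 :: comb ++ [(customers.length : Int)]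
      -- split_points[i] is always in range here, so the default 0 of pyGetD is never used
      let split := (PySem.List.pyRange 0 num_trucks).map (fun i =>
        PySem.List.slice customers (some (PySem.List.pyGetD split_points i 0))
          (some (PySem.List.pyGetD split_points (i + 1) 0)))
      all_splits ++ [split]) all_splits) []

-- ===== PORT B =====
-- port of Source B's partition; k = 0 is unreachable (generate_splits_alt only calls k ≥ 1)
def pvPartition : List Int → Nat → List (List (List Int))
  | _, 0 => []            -- unreachable
  | lst, 1 => [[lst]]
  | lst, k + 2 =>
    (PySem.List.pyRange 1 ((lst.length : Int) - ((k : Int) + 2) + 2)).foldl (fun result p =>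
      let head := PySem.List.slice lst none (some p)
      (pvPartition (PySem.List.slice lst (some p) none) (k + 1)).foldl
        (fun result rest => result ++ [head :: rest]) result) []

def generate_splits_alt (customers : List Int) (max_trucks : Int) : List (List (List Int)) :=
  -- num_trucks ≥ 1 on this range, so .toNat is exact
  (PySem.List.pyRange 1 (max_trucks + 1)).foldl
    (fun all_splits num_trucks => all_splits ++ pvPartition customers num_trucks.toNat) []

-- ===== PRECONDITION & SPEC =====
def Spec_generate_splits (customers : List Int) (max_trucks : Int) (out : List (List (List Int))) : Prop := out = generate_splits_alt customers max_trucks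
instance (customers : List Int) (max_trucks : Int) (out : List (List (List Int))) : Decidable (Spec_generate_splits customers max_trucks out) := by unfold Spec_generate_splits; infer_instance

-- ===== CLAIM (what is proved, stated in full; the proofs are below) =====
def Claim_equal_generate_splits : Prop := ∀ (customers : List Int) (max_trucks : Int), Dom_generate_splits customers max_trucks → Spec_generate_splits customers max_trucks (generate_splits customers max_trucks)

-- ===== LEMMAS AND PROOFS =====

def pvSegs (cust : List Int) : Int → List Int → List (List Int)
  | _, [] => []
  | a, b :: rest => PySem.List.slice cust (some a) (some b) :: pvSegs cust b rest

lemma pvCombinations_length {xs : List Int} {r : Nat} {c : List Int} (h : c ∈ pvCombinations xs r) : c.length = r := by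
  induction xs generalizing r c with
  | nil => cases r with
    | zero => simp [pvCombinations] at h; simp [h]
    | succ r => simp [pvCombinations] at h
  | cons x xs ih => cases r with
    | zero => simp [pvCombinations] at h; simp [h]
    | succ r =>
      simp only [pvCombinations, List.mem_append, List.mem_map] at h
      rcases h with ⟨c', hc', rfl⟩ | h
      · simp [ih hc']
      · exact ih h

lemma pyRange_shift (a : Int) : ∀ (m : Nat) (x y : Int), (y - x).toNat = m →
    PySem.List.pyRange (a + x) (a + y) = (PySem.List.pyRange x y).map (fun p => a + p) := by
  intro m
  induction m with
  | zero =>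
    intro x y h
    rw [PySem.List.pyRange_one_eq_nil (by omega), PySem.List.pyRange_one_eq_nil (by omega : y ≤ x)]
    rfl
  | succ m ih =>
    intro x y h
    rw [PySem.List.pyRange_one_cons (by omega : a + x < a + y), PySem.List.pyRange_one_cons (by omega : x < y)]
    have := ih (x + 1) y (by omega)
    simp only [List.map_cons]
    rw [show a + x + 1 = a + (x + 1) by ring, this]

lemma pvComb_group (k : Nat) : ∀ (m : Nat) (b n : Int), (n - b).toNat = m →
    pvCombinations (PySem.List.pyRange b n) (k + 1) =
      (PySem.List.pyRange b n).flatMap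
        (fun c1 => (pvCombinations (PySem.List.pyRange (c1 + 1) n) k).map (fun c => c1 :: c)) := by
  intro m
  induction m with
  | zero =>
    intro b n h
    rw [PySem.List.pyRange_one_eq_nil (by omega : n ≤ b)]
    rfl
  | succ m ih =>
    intro b n h
    rw [PySem.List.pyRange_one_cons (by omega : b < n)]
    show (pvCombinations _ k).map _ ++ pvCombinations _ (k + 1) = _
    rw [ih (b + 1) n (by omega), List.flatMap_cons]

lemma pvPartition_nil (lst : List Int) (k : Nat) (h : lst.length < k + 2) : pvPartition lst (k + 2) = [] := by
  show (PySem.List.pyRange 1 _).foldl _ [] = []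
  rw [PySem.List.pyRange_one_eq_nil (by omega)]
  rfl

lemma pvSegs_eq_map (cust : List Int) : ∀ (pts : List Int) (a : Int),
    (PySem.List.pyRange 0 (pts.length : Int)).map (fun i =>
      PySem.List.slice cust (some (PySem.List.pyGetD (a :: pts) i 0))
        (some (PySem.List.pyGetD (a :: pts) (i + 1) 0))) = pvSegs cust a pts := by
  intro pts
  induction pts with
  | nil => intro a; rw [PySem.List.pyRange_one_eq_nil (by simp)]; rfl
  | cons b rest ih =>
    intro a
    rw [PySem.List.pyRange_zero_natCast] at ih ⊢
    simp only [List.map_map, List.length_cons, List.range_succ_eq_map, List.map_cons,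
] at ih ⊢
    show _ :: _ = pvSegs cust a (b :: rest)
    rw [show pvSegs cust a (b :: rest) = PySem.List.slice cust (some a) (some b) :: pvSegs cust b rest from rfl]
    congr 1
    · norm_num [PySem.List.pyGetD_ofNat', PySem.List.pyGetD_natCast]
    · rw [← ih b]
      apply List.map_congr_left
      intro k _
      simp only [Function.comp_apply]
      have h1 : ((Nat.succ k : Nat) : Int) = ((k : Nat) : Int) + 1 := by omega
      rw [PySem.List.pyGetD_natCast, PySem.List.pyGetD_natCast,
        show ((Nat.succ k : Nat) : Int) + 1 = ((k + 2 : Nat) : Int) by omega,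
        PySem.List.pyGetD_natCast,
        show ((k : Nat) : Int) + 1 = ((k + 1 : Nat) : Int) by omega, PySem.List.pyGetD_natCast]
      simp

lemma pvCombinations_zero (xs : List Int) : pvCombinations xs 0 = [[]] := by
  cases xs <;> rfl

lemma pvMain (cust : List Int) : ∀ (k : Nat) (a : Nat), a ≤ cust.length →
    (pvCombinations (PySem.List.pyRange ((a : Int) + 1) (cust.length : Int)) k).map
      (fun c => pvSegs cust (a : Int) (c ++ [(cust.length : Int)]))
      = pvPartition (cust.drop a) (k + 1) := by
  intro k
  induction k with
  | zero =>
    intro a ha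
    rw [pvCombinations_zero]
    show [pvSegs cust (a : Int) [(cust.length : Int)]] = [[cust.drop a]]
    have : PySem.List.slice cust (some (a : Int)) (some (cust.length : Int)) = cust.drop a := by
      rw [show ((cust.length : Nat) : Int) = ((cust.length : Nat) : Int) from rfl, PySem.List.slice_natCast]
      exact List.take_of_length_le (by simp)
    simp [pvSegs, this]
  | succ k ih =>
    intro a ha
    -- LHS: group A's combinations by their first element
    rw [pvComb_group k ((cust.length : Int) - ((a : Int) + 1)).toNat ((a : Int) + 1) (cust.length : Int) rfl]
    rw [List.map_flatMap]
    -- RHS: turn B's foldl loops into a flatMap of mapped recursive calls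
    show _ = (PySem.List.pyRange 1 (((cust.drop a).length : Int) - ((k : Int) + 2) + 2)).foldl _ []
    have hflat : ∀ (L : List Int) (init : List (List (List Int))),
        L.foldl (fun result p =>
          (pvPartition (PySem.List.slice (cust.drop a) (some p) none) (k + 1)).foldl
            (fun result rest => result ++ [PySem.List.slice (cust.drop a) none (some p) :: rest]) result) init
        = init ++ L.flatMap (fun p => (pvPartition (PySem.List.slice (cust.drop a) (some p) none) (k + 1)).map
            (fun rest => PySem.List.slice (cust.drop a) none (some p) :: rest)) := by
      intro L init
      rw [← PySem.List.foldl_append_eq_flatMap]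
      apply PySem.List.foldl_congr_mem
      intro acc p _
      rw [PySem.List.foldl_append_singleton_eq_map]
    rw [hflat, List.nil_append]
    have hub : (((cust.drop a).length : Int)) - ((k : Int) + 2) + 2
        = (cust.length : Int) - (a : Int) - (k : Int) := by
      simp only [List.length_drop]; omega
    rw [hub]
    -- normalise the left side to flatMap over first split points c1
    have hE1 : (PySem.List.pyRange ((a : Int) + 1) (cust.length : Int)).flatMap
        (fun c1 => (pvCombinations (PySem.List.pyRange (c1 + 1) (cust.length : Int)) k).map
          (fun c => pvSegs cust (a : Int) (c1 :: (c ++ [(cust.length : Int)]))))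
        = (PySem.List.pyRange ((a : Int) + 1) (cust.length : Int)).flatMap
        (fun c1 => (pvPartition (cust.drop c1.toNat) (k + 1)).map
          (fun rest => PySem.List.slice cust (some (a : Int)) (some c1) :: rest)) := by
      apply List.flatMap_congr
      intro c1 hc1
      rw [PySem.List.mem_pyRange_one] at hc1
      have hc : c1 = ((c1.toNat : Nat) : Int) := by omega
      show (pvCombinations (PySem.List.pyRange (c1 + 1) (cust.length : Int)) k).map
          (fun c => PySem.List.slice cust (some (a : Int)) (some c1)
            :: pvSegs cust c1 (c ++ [(cust.length : Int)])) = _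
      rw [show (fun c => PySem.List.slice cust (some (a : Int)) (some c1)
            :: pvSegs cust c1 (c ++ [(cust.length : Int)]))
          = ((fun rest => PySem.List.slice cust (some (a : Int)) (some c1) :: rest)
            ∘ (fun c => pvSegs cust c1 (c ++ [(cust.length : Int)]))) from rfl,
        ← List.map_map]
      congr 1
      rw [hc]
      exact ih c1.toNat (by omega)
    simp only [List.map_map, Function.comp_def, List.cons_append]
    rw [hE1]
    by_cases hcase : (a : Int) + 1 ≤ (cust.length : Int) - (k : Int)
    · rw [PySem.List.pyRange_one_append ((a : Int) + 1) ((cust.length : Int) - (k : Int))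
        (cust.length : Int) hcase (by omega), List.flatMap_append]
      have h2 : ((PySem.List.pyRange ((cust.length : Int) - (k : Int)) (cust.length : Int)).flatMap
          (fun c1 => (pvPartition (cust.drop c1.toNat) (k + 1)).map
            (fun rest => PySem.List.slice cust (some (a : Int)) (some c1) :: rest))) = [] := by
        apply List.flatMap_eq_nil_iff.mpr
        intro c1 hc1
        rw [PySem.List.mem_pyRange_one] at hc1
        cases k with
        | zero => omega
        | succ k' =>
          rw [pvPartition_nil _ k' (by simp only [List.length_drop]; omega)]
          rfl
      rw [h2, List.append_nil,
        show (cust.length : Int) - (k : Int) = (a : Int) + ((cust.length : Int) - (a : Int) - (k : Int)) by ring,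
        pyRange_shift (a : Int) _ 1 _ rfl, List.flatMap_map]
      apply List.flatMap_congr
      intro p hp
      rw [PySem.List.mem_pyRange_one] at hp
      rw [PySem.List.slice_to _ (by omega : (0:Int) ≤ p), PySem.List.slice_from _ (by omega : (0:Int) ≤ p),
        List.drop_drop,
        show ((a : Int) + p).toNat = p.toNat + a by omega,
        show (a : Int) + p = ((a + p.toNat : Nat) : Int) by omega,
        PySem.List.slice_natCast,
        show a + p.toNat - a = p.toNat by omega, Nat.add_comm p.toNat a]
    · rw [PySem.List.pyRange_one_eq_nil (by omega : (cust.length : Int) - (a : Int) - (k : Int) ≤ 1),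
        List.flatMap_nil]
      apply List.flatMap_eq_nil_iff.mpr
      intro c1 hc1
      rw [PySem.List.mem_pyRange_one] at hc1
      cases k with
      | zero => omega
      | succ k' =>
        rw [pvPartition_nil _ k' (by simp only [List.length_drop]; omega)]
        rfl

-- ===== VERDICT (by name: the statement is the Claim_ definition above) =====
theorem generate_splits_spec : Claim_equal_generate_splits := by
  intro cust mt _
  show generate_splits cust mt = generate_splits_alt cust mt
  unfold generate_splits generate_splits_alt
  simp only []
  have hA : ∀ (init : List (List (List Int))),
      (PySem.List.pyRange 1 (mt + 1)).foldl (fun all_splits num_trucks =>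
        (pvCombinations (PySem.List.pyRange 1 (cust.length : Int)) (num_trucks - 1).toNat).foldl
          (fun all_splits comb =>
            all_splits ++ [(PySem.List.pyRange 0 num_trucks).map (fun i =>
              PySem.List.slice cust
                (some (PySem.List.pyGetD (0 :: comb ++ [(cust.length : Int)]) i 0))
                (some (PySem.List.pyGetD (0 :: comb ++ [(cust.length : Int)]) (i + 1) 0)))])
          all_splits) init
      = init ++ (PySem.List.pyRange 1 (mt + 1)).flatMap (fun num_trucks =>
          (pvCombinations (PySem.List.pyRange 1 (cust.length : Int)) (num_trucks - 1).toNat).map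
            (fun comb => (PySem.List.pyRange 0 num_trucks).map (fun i =>
              PySem.List.slice cust
                (some (PySem.List.pyGetD (0 :: comb ++ [(cust.length : Int)]) i 0))
                (some (PySem.List.pyGetD (0 :: comb ++ [(cust.length : Int)]) (i + 1) 0))))) := by
    intro init
    rw [← PySem.List.foldl_append_eq_flatMap]
    apply PySem.List.foldl_congr_mem
    intro acc nt _
    rw [PySem.List.foldl_append_singleton_eq_map]
  have hB : ∀ (init : List (List (List Int))),
      (PySem.List.pyRange 1 (mt + 1)).foldl
        (fun all_splits num_trucks => all_splits ++ pvPartition cust num_trucks.toNat) init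
      = init ++ (PySem.List.pyRange 1 (mt + 1)).flatMap (fun num_trucks => pvPartition cust num_trucks.toNat) := by
    intro init
    rw [← PySem.List.foldl_append_eq_flatMap]
  rw [hA, hB]
  congr 1
  apply List.flatMap_congr
  intro nt hnt
  rw [PySem.List.mem_pyRange_one] at hnt
  have hper : ∀ comb ∈ pvCombinations (PySem.List.pyRange 1 (cust.length : Int)) (nt - 1).toNat,
      (PySem.List.pyRange 0 nt).map (fun i =>
        PySem.List.slice cust
          (some (PySem.List.pyGetD (0 :: comb ++ [(cust.length : Int)]) i 0))
          (some (PySem.List.pyGetD (0 :: comb ++ [(cust.length : Int)]) (i + 1) 0)))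
      = pvSegs cust 0 (comb ++ [(cust.length : Int)]) := by
    intro comb hcomb
    have hlen : comb.length = (nt - 1).toNat := pvCombinations_length hcomb
    have hnt' : nt = (((comb ++ [(cust.length : Int)]).length : Nat) : Int) := by
      simp [hlen]; omega
    rw [hnt']
    exact pvSegs_eq_map cust (comb ++ [(cust.length : Int)]) 0
  rw [List.map_congr_left hper]
  have h0 := pvMain cust (nt - 1).toNat 0 (by omega)
  simp only [Nat.cast_zero, zero_add, List.drop_zero] at h0
  rw [h0, show (nt - 1).toNat + 1 = nt.toNat by omega]
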